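-- pv_equiv track=rewrite | github.com/ronrlin/talent-scout | openclaw/shared/scripts/scout_tools.py | _apply_fuzzy_replacement
-- ===== SOURCE A (Python) =====
-- def _apply_fuzzy_replacement(resume, current_text, proposed_text):
--     """Apply replacement with normalized whitespace matching."""
--     if not current_text:
--         return None
--
--     def normalize(text):
--         return " ".join(text.split())
--
--     normalized_current = normalize(current_text)
--     lines = resume.split("\n")
--     rebuilt = []
--     found = False
--
--     i = 0
--     while i < len(lines):
--         if not found:
--             # Try single line match
--             if normalize(lines[i]) == normalized_current:
--                 leading = lines[i][: len(lines[i]) - len(lines[i].lstrip())]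
--                 rebuilt.append(leading + proposed_text.strip())
--                 found = True
--                 i += 1
--                 continue
--
--             # Try matching the line content (stripping markdown bullet prefix)
--             line_content = lines[i].lstrip()
--             if line_content.startswith("- "):
--                 line_content = line_content[2:]
--             current_content = current_text.lstrip()
--             if current_content.startswith("- "):
--                 current_content = current_content[2:]
--
--             if normalize(line_content) == normalize(current_content):
--                 leading = lines[i][: len(lines[i]) - len(lines[i].lstrip())]
--                 if lines[i].lstrip().startswith("- "):
--                     prefix = leading + "- "
--                     new_text = proposed_text.strip()
--                     if new_text.startswith("- "):
--                         new_text = new_text[2:]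
--                     rebuilt.append(prefix + new_text)
--                 else:
--                     rebuilt.append(leading + proposed_text.strip())
--                 found = True
--                 i += 1
--                 continue
--
--         rebuilt.append(lines[i])
--         i += 1
--
--     if found:
--         return "\n".join(rebuilt)
--     return None
-- ===== SOURCE B (Python) =====
-- def _apply_fuzzy_replacement(resume, current_text, proposed_text):
--     """Apply replacement with normalized whitespace matching.
--
--     B: staged algorithm — precompute the normalized form and the
--     bullet-stripped normalized key of every line, locate the first direct
--     match and the first bullet match independently with list.index, take
--     the earlier of the two, and patch that single line."""
--     if not current_text:
--         return None
--
--     def normalize(text):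
--         return " ".join(text.split())
--
--     def debullet(text):
--         return text[2:] if text.startswith("- ") else text
--
--     lines = resume.split("\n")
--     norms = [normalize(line) for line in lines]
--     keys = [normalize(debullet(line.lstrip())) for line in lines]
--     t_direct = normalize(current_text)
--     t_bullet = normalize(debullet(current_text.lstrip()))
--
--     n = len(lines)
--     i_direct = norms.index(t_direct) if t_direct in norms else n
--     i_bullet = keys.index(t_bullet) if t_bullet in keys else n
--     i = min(i_direct, i_bullet)
--     if i == n:
--         return None
--
--     line = lines[i]
--     leading = line[: len(line) - len(line.lstrip())]
--     if i_direct <= i_bullet: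
--         lines[i] = leading + proposed_text.strip()
--     elif line.lstrip().startswith("- "):
--         lines[i] = leading + "- " + debullet(proposed_text.strip())
--     else:
--         lines[i] = leading + proposed_text.strip()
--     return "\n".join(lines)
-- ===== Notes on version B (the rewrite author's own statement) =====
-- stated objective: alternative
-- what changed: Replaces A's single-pass found-flag rebuild loop by a staged algorithm: precompute the normalized form and the bullet-stripped key of every line, find the first direct match and the first bullet match independently with list.index, take the earlier of the two, and patch that single line in place.
import Mathlib
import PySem

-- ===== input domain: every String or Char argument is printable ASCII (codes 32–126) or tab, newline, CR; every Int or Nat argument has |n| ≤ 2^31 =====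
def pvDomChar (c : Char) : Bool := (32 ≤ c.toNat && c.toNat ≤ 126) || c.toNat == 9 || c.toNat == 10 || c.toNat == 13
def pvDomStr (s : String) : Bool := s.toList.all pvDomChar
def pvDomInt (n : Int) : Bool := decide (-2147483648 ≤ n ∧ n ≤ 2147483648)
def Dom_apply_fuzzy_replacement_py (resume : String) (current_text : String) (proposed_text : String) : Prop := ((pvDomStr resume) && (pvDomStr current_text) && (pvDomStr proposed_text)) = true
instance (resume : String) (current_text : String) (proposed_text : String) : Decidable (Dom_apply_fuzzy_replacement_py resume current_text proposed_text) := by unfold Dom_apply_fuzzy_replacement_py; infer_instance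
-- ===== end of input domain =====

-- B replaces A's single-pass found-flag loop by a staged algorithm: precompute per-line normalized forms and
-- bullet-stripped keys, locate the first direct match and first bullet match independently with list.index,
-- take the earlier, and patch that one line (objective: alternative).


-- ===== PORT A =====
-- normalize(text) = " ".join(text.split())  (both Pythons define the same local helper)
def pyNormalize (t : String) : String := PySem.Str.join " " (PySem.Str.split₀ t)

-- leading = line[: len(line) - len(line.lstrip())]  (identical expression in both Pythons)
def pyLeading (l : String) : String :=
  PySem.Str.slice l none (some (PySem.Str.len l - PySem.Str.len (PySem.Str.lstrip l)))

-- resume.split("\n"): separator is nonempty, so split? is always `some`; getD [] is unreachable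
def pySplitNL (s : String) : List String := (PySem.Str.split? s "\n").getD []

-- the while-loop of A: state = (remaining lines, rebuilt, found)
def aLoop (nc ct pt : String) : List String → List String → Bool → List String × Bool
  | [], rebuilt, found => (rebuilt, found)
  | l :: rest, rebuilt, found =>
    if found then aLoop nc ct pt rest (rebuilt ++ [l]) found
    else if pyNormalize l == nc then
      aLoop nc ct pt rest (rebuilt ++ [pyLeading l ++ PySem.Str.strip pt]) true
    else
      let lc0 := PySem.Str.lstrip l
      let lc := if PySem.Str.startswith lc0 "- " then PySem.Str.slice lc0 (some 2) none else lc0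
      let cc0 := PySem.Str.lstrip ct
      let cc := if PySem.Str.startswith cc0 "- " then PySem.Str.slice cc0 (some 2) none else cc0
      if pyNormalize lc == pyNormalize cc then
        if PySem.Str.startswith (PySem.Str.lstrip l) "- " then
          let nt0 := PySem.Str.strip pt
          let nt := if PySem.Str.startswith nt0 "- " then PySem.Str.slice nt0 (some 2) none else nt0
          aLoop nc ct pt rest (rebuilt ++ [pyLeading l ++ "- " ++ nt]) true
        else
          aLoop nc ct pt rest (rebuilt ++ [pyLeading l ++ PySem.Str.strip pt]) true
      else aLoop nc ct pt rest (rebuilt ++ [l]) found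

def apply_fuzzy_replacement_py (resume : String) (current_text : String) (proposed_text : String) : Option String :=
  if current_text == "" then none
  else
    let nc := pyNormalize current_text
    let st := aLoop nc current_text proposed_text (pySplitNL resume) [] false
    if st.2 then some (PySem.Str.join "\n" st.1) else none

-- ===== PORT B =====
-- debullet(text) = text[2:] if text.startswith("- ") else text
def pyDebullet (t : String) : String :=
  if PySem.Str.startswith t "- " then PySem.Str.slice t (some 2) none else t

-- B's staged body after the empty-current_text guard: normalized lists, two index searches, patch one line.
-- (index? xs v).getD n  is  `xs.index(v) if v in xs else n`;  lines.getD i ""  is  lines[i]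
-- (i < lines.length whenever it is read, so the default "" is never used).
def bFindReplace (ct pt : String) (lines : List String) : Option (List String) :=
  let norms := lines.map (fun l => pyNormalize l)
  let keys := lines.map (fun l => pyNormalize (pyDebullet (PySem.Str.lstrip l)))
  let t1 := pyNormalize ct
  let t2 := pyNormalize (pyDebullet (PySem.Str.lstrip ct))
  let n := lines.length
  let i1 := (PySem.List.index? norms t1).getD n
  let i2 := (PySem.List.index? keys t2).getD n
  let i := min i1 i2
  if i == n then none
  else
    let line := lines.getD i ""
    let leading := PySem.Str.slice line none (some (PySem.Str.len line - PySem.Str.len (PySem.Str.lstrip line)))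
    if i1 ≤ i2 then some (lines.set i (leading ++ PySem.Str.strip pt))
    else if PySem.Str.startswith (PySem.Str.lstrip line) "- " then
      some (lines.set i (leading ++ "- " ++ pyDebullet (PySem.Str.strip pt)))
    else some (lines.set i (leading ++ PySem.Str.strip pt))

def apply_fuzzy_replacement_py_alt (resume : String) (current_text : String) (proposed_text : String) : Option String :=
  if current_text == "" then none
  else Option.map (fun ls => PySem.Str.join "\n" ls) (bFindReplace current_text proposed_text (pySplitNL resume))

-- ===== PRECONDITION & SPEC =====
def Spec_apply_fuzzy_replacement_py (resume : String) (current_text : String) (proposed_text : String) (out : Option String) : Prop := out = apply_fuzzy_replacement_py_alt resume current_text proposed_text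
instance (resume : String) (current_text : String) (proposed_text : String) (out : Option String) : Decidable (Spec_apply_fuzzy_replacement_py resume current_text proposed_text out) := by unfold Spec_apply_fuzzy_replacement_py; infer_instance

-- ===== CLAIM (what is proved, stated in full; the proofs are below) =====
def Claim_equal_apply_fuzzy_replacement_py : Prop := ∀ (resume : String) (current_text : String) (proposed_text : String), Dom_apply_fuzzy_replacement_py resume current_text proposed_text → Spec_apply_fuzzy_replacement_py resume current_text proposed_text (apply_fuzzy_replacement_py resume current_text proposed_text)

-- ===== LEMMAS AND PROOFS =====
-- Proof-only intermediate: the first-match/one-patch recursion both programs are equal to.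
def pvTryRepl (ct pt l : String) : Option String :=
  if pyNormalize l == pyNormalize ct then some (pyLeading l ++ PySem.Str.strip pt)
  else if pyNormalize (pyDebullet (PySem.Str.lstrip l)) == pyNormalize (pyDebullet (PySem.Str.lstrip ct)) then
    (if PySem.Str.startswith (PySem.Str.lstrip l) "- " then
      some (pyLeading l ++ "- " ++ pyDebullet (PySem.Str.strip pt))
    else some (pyLeading l ++ PySem.Str.strip pt))
  else none

def pvFirst (ct pt : String) : List String → Option (List String)
  | [] => none
  | l :: rest =>
    match pvTryRepl ct pt l with
    | some r => some (r :: rest)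
    | none => Option.map (fun ls => l :: ls) (pvFirst ct pt rest)

theorem aLoop_found (nc ct pt : String) : ∀ (lines rebuilt : List String),
    aLoop nc ct pt lines rebuilt true = (rebuilt ++ lines, true) := by
  intro lines
  induction lines with
  | nil => intro rebuilt; simp [aLoop]
  | cons l rest ih => intro rebuilt; simp [aLoop, ih]

theorem aLoop_eq (ct pt : String) : ∀ (lines rebuilt : List String),
    aLoop (pyNormalize ct) ct pt lines rebuilt false =
      (match pvFirst ct pt lines with
       | some ls => (rebuilt ++ ls, true)
       | none => (rebuilt ++ lines, false)) := by
  intro lines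
  induction lines with
  | nil => intro rebuilt; simp [aLoop, pvFirst]
  | cons l rest ih =>
    intro rebuilt
    simp only [aLoop, pvFirst, pvTryRepl, pyDebullet, pyLeading, Bool.false_eq_true, if_false]
    split_ifs <;>
      first
        | (rw [aLoop_found]; simp)
        | (rw [ih]; cases hb : pvFirst ct pt rest <;> simp)

theorem getD_map_succ (o : Option Nat) (n : Nat) :
    (o.map (· + 1)).getD (n + 1) = o.getD n + 1 := by cases o <;> simp

theorem bFind_eq (ct pt : String) : ∀ (lines : List String),
    bFindReplace ct pt lines = pvFirst ct pt lines := by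
  intro lines
  induction lines with
  | nil => simp [bFindReplace, pvFirst, PySem.List.index?]
  | cons l rest ih =>
    by_cases h1 : pyNormalize l = pyNormalize ct
    · simp only [bFindReplace, pvFirst, pvTryRepl, List.map_cons, List.length_cons]
      rw [h1, PySem.List.index?_cons_self]
      simp [pyLeading]
    · by_cases h2 : pyNormalize (pyDebullet (PySem.Str.lstrip l)) = pyNormalize (pyDebullet (PySem.Str.lstrip ct))
      · simp only [bFindReplace, pvFirst, pvTryRepl, List.map_cons, List.length_cons, pyLeading]
        have h1b : (pyNormalize l == pyNormalize ct) = false := by simpa using h1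
        have h2b : (pyNormalize (pyDebullet (PySem.Str.lstrip l)) == pyNormalize (pyDebullet (PySem.Str.lstrip ct))) = true := by simpa using h2
        have hidx : PySem.List.index? (pyNormalize (pyDebullet (PySem.Str.lstrip l)) :: rest.map (fun l => pyNormalize (pyDebullet (PySem.Str.lstrip l)))) (pyNormalize (pyDebullet (PySem.Str.lstrip ct))) = some 0 := by
          rw [h2]; exact PySem.List.index?_cons_self _ _
        have hz : ((0 : Nat) == rest.length + 1) = false := by simp
        rw [PySem.List.index?_cons_of_ne _ h1, hidx]
        simp only [h1b, h2b, Bool.false_eq_true, if_false, if_true]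
        simp only [getD_map_succ, Option.getD_some, Nat.min_zero]
        simp only [hz, Bool.false_eq_true, if_false]
        rw [if_neg (by omega : ¬ ((PySem.List.index? (rest.map (fun l => pyNormalize l)) (pyNormalize ct)).getD rest.length + 1 ≤ 0))]
        simp only [List.getElem?_cons_zero, List.getD, Option.getD_some, List.set_cons_zero]
        split_ifs <;> rfl
      · simp only [bFindReplace, pvFirst, pvTryRepl, List.map_cons, List.length_cons, pyLeading]
        have h1b : (pyNormalize l == pyNormalize ct) = false := by simpa using h1
        have h2b : (pyNormalize (pyDebullet (PySem.Str.lstrip l)) == pyNormalize (pyDebullet (PySem.Str.lstrip ct))) = false := by simpa using h2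
        rw [PySem.List.index?_cons_of_ne _ h1, PySem.List.index?_cons_of_ne _ h2]
        simp only [h1b, h2b, Bool.false_eq_true, if_false]
        simp only [getD_map_succ]
        rw [← ih]
        simp only [bFindReplace]
        set a := (PySem.List.index? (rest.map (fun l => pyNormalize l)) (pyNormalize ct)).getD rest.length with ha
        set b := (PySem.List.index? (rest.map (fun l => pyNormalize (pyDebullet (PySem.Str.lstrip l)))) (pyNormalize (pyDebullet (PySem.Str.lstrip ct)))).getD rest.length with hb
        have hm : min (a + 1) (b + 1) = min a b + 1 := by omega
        rw [hm]
        by_cases hn : min a b = rest.length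
        · simp [hn]
        · rw [if_neg (by simp only [beq_iff_eq]; omega : ¬ ((min a b + 1 == rest.length + 1) = true)),
              if_neg (by simpa using hn : ¬ ((min a b == rest.length) = true))]
          simp only [List.getD, List.getElem?_cons_succ, List.set_cons_succ, Nat.add_le_add_iff_right]
          split_ifs <;> simp

-- ===== VERDICT (by name: the statement is the Claim_ definition above) =====
theorem apply_fuzzy_replacement_py_spec : Claim_equal_apply_fuzzy_replacement_py := by
  intro resume ct pt _
  unfold Spec_apply_fuzzy_replacement_py apply_fuzzy_replacement_py apply_fuzzy_replacement_py_alt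
  by_cases h : (ct == "") = true
  · simp [h]
  · simp only [Bool.not_eq_true] at h
    simp only [h, Bool.false_eq_true, if_false]
    rw [aLoop_eq, bFind_eq]
    cases hb : pvFirst ct pt (pySplitNL resume) <;> simp
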